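-- pv_equiv track=rewrite | github.com/shizhenneko/Translator | src/translator/markdown_lint.py | _inline_code_mask
-- ===== SOURCE A (Python) =====
-- from typing import List, Optional, Sequence
--
-- def _inline_code_mask(line: str) -> List[bool]:
--     mask = [False] * len(line)
--     open_start: Optional[int] = None
--     open_len: Optional[int] = None
--     index = 0
--     while index < len(line):
--         if line[index] != "`":
--             index += 1
--             continue
--         end = index
--         while end < len(line) and line[end] == "`":
--             end += 1
--         run_len = end - index
--         if open_len is None:
--             open_start = index
--             open_len = run_len
--         elif run_len == open_len and open_start is not None:
--             for mark in range(open_start, end):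
--                 mask[mark] = True
--             open_start = None
--             open_len = None
--         index = end
--     return mask
-- ===== SOURCE B (Python) =====
-- # B: match-and-jump recursion — hunt for each opener's equal-length closing run,
-- # emit the matched spans, and assemble the mask by segment concatenation (no
-- # in-place mask mutation, no stateful open/skip scan).
-- def _inline_code_mask(line):
--     n = len(line)
--
--     def run_at(i):
--         """(start, end) of the first maximal backtick run at or after i, else None."""
--         while i < n and line[i] != "`":
--             i += 1
--         if i == n:
--             return None
--         j = i
--         while j < n and line[j] == "`":
--             j += 1
--         return (i, j)
--
--     def spans(i):
--         """matched inline-code spans (start, end) from position i on, recursively."""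
--         opener = run_at(i)
--         if opener is None:
--             return []
--         s, e = opener
--         length = e - s
--         closer = run_at(e)
--         while closer is not None and closer[1] - closer[0] != length:
--             closer = run_at(closer[1])
--         if closer is None:
--             return []
--         return [(s, closer[1])] + spans(closer[1])
--
--     mask = []
--     pos = 0
--     for s, e in spans(0):
--         mask += [False] * (s - pos) + [True] * (e - s)
--         pos = e
--     mask += [False] * (n - pos)
--     return mask
-- ===== Notes on version B (the rewrite author's own statement) =====
-- stated objective: alternative
-- what changed: A is a single stateful scan holding open_start/open_len and deciding close-or-skip at each run; B instead recursively hunts, for each opener run, forward for the first equal-length closer run, emits the matched (start,end) spans, and assembles the mask by concatenating False-gap/True-span segments instead of setting mask cells in place.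
import Mathlib
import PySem

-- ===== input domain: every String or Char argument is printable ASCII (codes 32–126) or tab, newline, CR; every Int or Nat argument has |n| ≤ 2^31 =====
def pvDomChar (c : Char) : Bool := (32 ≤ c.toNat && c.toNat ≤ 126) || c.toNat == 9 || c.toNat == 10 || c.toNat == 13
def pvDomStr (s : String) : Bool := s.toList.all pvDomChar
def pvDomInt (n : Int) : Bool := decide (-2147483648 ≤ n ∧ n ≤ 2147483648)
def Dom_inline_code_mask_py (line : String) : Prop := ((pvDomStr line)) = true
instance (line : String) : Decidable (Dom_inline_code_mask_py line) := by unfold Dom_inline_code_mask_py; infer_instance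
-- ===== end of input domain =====

-- B replaces A's stateful open/skip/close scan with match-and-jump recursion: hunt for each
-- opener's equal-length closer, emit the matched spans, assemble the mask by concatenation.
-- (All while-loops are ported with a fuel parameter ≥ the loop's iteration count — a pure
-- totality guard, proven sufficient in the lemmas below; it never changes the computed value.)

-- ===== PORT A =====

-- `for mark in range(open_start, end): mask[mark] = True` — exact: at every call site each
-- mark satisfies 0 ≤ mark < mask.length, so `List.set mark.toNat` matches Python's assignment.
def maskSet (mask : List Bool) (a b : Int) : List Bool :=
  (PySem.List.pyRange a b 1).foldl (fun m k => m.set k.toNat true) mask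

-- A's inner `while end < len(line) and line[end] == "`"` (index always ≥ 0 here)
def runEndA (l : List Char) : Nat → Int → Int
  | 0, e => e
  | f + 1, e =>
    if e < (l.length : Int) ∧ l.getD e.toNat ' ' = '`' then runEndA l f (e + 1) else e

def runEndTopA (l : List Char) (e : Int) : Int := runEndA l (l.length + 1) e

-- A's outer while-loop, state (mask, open_start, open_len, index)
def goA (l : List Char) : Nat → List Bool → Option Int → Option Int → Int → List Bool
  | 0, mask, _, _, _ => mask
  | f + 1, mask, openStart, openLen, index =>
    if index < (l.length : Int) then
      if l.getD index.toNat ' ' ≠ '`' then goA l f mask openStart openLen (index + 1)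
      else
        let e := runEndTopA l index
        let runLen := e - index
        match openLen with
        | none => goA l f mask (some index) (some runLen) e
        | some ol =>
          if runLen = ol ∧ openStart.isSome then
            -- open_start is not None here, so getD 0 is Python's open_start
            goA l f (maskSet mask (openStart.getD 0) e) none none e
          else goA l f mask openStart openLen e
    else mask

def inline_code_mask_py (line : String) : List Bool :=
  let l := line.toList
  goA l (l.length + 1) (List.replicate l.length false) none none 0

-- ===== PORT B =====

-- the `while j < n and line[j] == "`"` loop inside run_at
def runEndB (l : List Char) : Nat → Int → Int
  | 0, j => j
  | f + 1, j =>
    if j < (l.length : Int) ∧ l.getD j.toNat ' ' = '`' then runEndB l f (j + 1) else j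

def runEndTopB (l : List Char) (j : Int) : Int := runEndB l (l.length + 1) j

-- B's run_at: skip non-backticks (first while), then return the backtick run (or None)
def runAtB (l : List Char) : Nat → Int → Option (Int × Int)
  | 0, _ => none
  | f + 1, i =>
    if i < (l.length : Int) then
      if l.getD i.toNat ' ' ≠ '`' then runAtB l f (i + 1)
      else some (i, runEndTopB l i)
    else none

def runAtTop (l : List Char) (i : Int) : Option (Int × Int) := runAtB l (l.length + 1) i

-- B's `while closer is not None and closer[1] - closer[0] != length` hunt loop
def huntB (l : List Char) (length : Int) : Nat → Option (Int × Int) → Option (Int × Int)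
  | 0, _ => none
  | f + 1, c =>
    match c with
    | none => none
    | some q => if q.2 - q.1 ≠ length then huntB l length f (runAtTop l q.2) else some q

-- B's spans(i): opener, hunt for an equal-length closer, recurse past it
def spansB (l : List Char) : Nat → Int → List (Int × Int)
  | 0, _ => []
  | f + 1, i =>
    match runAtTop l i with
    | none => []
    | some se =>
      match huntB l (se.2 - se.1) (l.length + 1) (runAtTop l se.2) with
      | none => []
      | some c => (se.1, c.2) :: spansB l f c.2

def bStep2 (acc : List Bool × Int) (p : Int × Int) : List Bool × Int :=
  (acc.1 ++ List.replicate (p.1 - acc.2).toNat false ++ List.replicate (p.2 - p.1).toNat true,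
   p.2)

def inline_code_mask_py_alt (line : String) : List Bool :=
  let l := line.toList
  let r := (spansB l (l.length + 1) 0).foldl bStep2 ([], 0)
  r.1 ++ List.replicate ((l.length : Int) - r.2).toNat false

-- ===== PRECONDITION & SPEC =====
def Spec_inline_code_mask_py (line : String) (out : List Bool) : Prop := out = inline_code_mask_py_alt line
instance (line : String) (out : List Bool) : Decidable (Spec_inline_code_mask_py line out) := by unfold Spec_inline_code_mask_py; infer_instance

-- ===== CLAIM (what is proved, stated in full; the proofs are below) =====
def Claim_equal_inline_code_mask_py : Prop := ∀ (line : String), Dom_inline_code_mask_py line → Spec_inline_code_mask_py line (inline_code_mask_py line)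

-- ===== LEMMAS AND PROOFS =====

-- fuel facts for A's inner while
theorem runEndA_ge (l : List Char) : ∀ (f : Nat) (e : Int), e ≤ runEndA l f e := by
  intro f
  induction f with
  | zero => intro e; simp [runEndA]
  | succ f ih =>
    intro e
    simp only [runEndA]
    split
    · have := ih (e + 1); omega
    · omega

theorem runEndA_le (l : List Char) : ∀ (f : Nat) (e : Int), e ≤ (l.length : Int) →
    runEndA l f e ≤ (l.length : Int) := by
  intro f
  induction f with
  | zero => intro e he; simpa [runEndA] using he
  | succ f ih =>
    intro e he
    simp only [runEndA]
    split
    · rename_i h; exact ih (e + 1) (by omega)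
    · exact he

theorem topA_gt (l : List Char) (e : Int) (h1 : e < (l.length : Int))
    (h2 : l.getD e.toNat ' ' = '`') : e + 1 ≤ runEndTopA l e := by
  simp only [runEndTopA, runEndA]
  rw [if_pos ⟨h1, h2⟩]
  exact runEndA_ge l l.length (e + 1)

theorem topA_le (l : List Char) (e : Int) (he : e ≤ (l.length : Int)) :
    runEndTopA l e ≤ (l.length : Int) := runEndA_le l _ e he

-- B's inner while is the same loop
theorem runEndB_eq_runEndA (l : List Char) : ∀ (f : Nat) (e : Int),
    runEndB l f e = runEndA l f e := by
  intro f
  induction f with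
  | zero => intro e; rfl
  | succ f ih =>
    intro e
    simp only [runEndB, runEndA]
    split
    · exact ih (e + 1)
    · rfl

theorem topB_eq_topA (l : List Char) (e : Int) : runEndTopB l e = runEndTopA l e :=
  runEndB_eq_runEndA l _ e

-- the maximal backtick runs of l from position i (absolute half-open intervals)
def collect (l : List Char) : Nat → Int → List (Int × Int)
  | 0, _ => []
  | f + 1, i =>
    if i < (l.length : Int) then
      if l.getD i.toNat ' ' ≠ '`' then collect l f (i + 1)
      else (i, runEndTopA l i) :: collect l f (runEndTopA l i)
    else []

def collectTop (l : List Char) (i : Int) : List (Int × Int) := collect l (l.length + 1) i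

theorem collect_fuel (l : List Char) : ∀ (f f' : Nat) (i : Int), 0 ≤ i →
    ((l.length : Int) - i).toNat < f → ((l.length : Int) - i).toNat < f' →
    collect l f i = collect l f' i := by
  intro f
  induction f with
  | zero => intro f' i h0 h; omega
  | succ f ih =>
    intro f' i h0 h h'
    cases f' with
    | zero => omega
    | succ f' =>
      simp only [collect]
      split
      · rename_i hi
        split
        · rename_i hc; exact ih f' (i + 1) (by omega) (by omega) (by omega)
        · rename_i hc
          have hgt := topA_gt l i hi (by push Not at hc; exact hc)
          rw [ih f' (runEndTopA l i) (by omega) (by omega) (by omega)]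
      · rfl

theorem collectTop_stop (l : List Char) (i : Int) (hi : ¬ i < (l.length : Int)) :
    collectTop l i = [] := by
  simp only [collectTop, collect]
  rw [if_neg hi]

theorem collectTop_skip (l : List Char) (i : Int) (h0 : 0 ≤ i) (hi : i < (l.length : Int))
    (hc : l.getD i.toNat ' ' ≠ '`') : collectTop l i = collectTop l (i + 1) := by
  simp only [collectTop, collect]
  rw [if_pos hi, if_pos hc]
  exact collect_fuel l l.length (l.length + 1) (i + 1) (by omega) (by omega) (by omega)

theorem collectTop_run (l : List Char) (i : Int) (h0 : 0 ≤ i) (hi : i < (l.length : Int))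
    (hc : l.getD i.toNat ' ' = '`') :
    collectTop l i = (i, runEndTopA l i) :: collectTop l (runEndTopA l i) := by
  simp only [collectTop, collect]
  rw [if_pos hi, if_neg (not_not_intro hc)]
  have hgt := topA_gt l i hi hc
  exact congrArg _ (collect_fuel l l.length (l.length + 1) (runEndTopA l i) (by omega)
    (by omega) (by omega))

-- recursive form of A's pairing behaviour, state = open run
def pairs : List (Int × Int) → List Bool → Option (Int × Int) → List Bool
  | [], mask, _ => mask
  | r :: rs, mask, none => pairs rs mask (some r)
  | r :: rs, mask, some q =>
    if r.2 - r.1 = q.2 - q.1 then pairs rs (maskSet mask q.1 r.2) none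
    else pairs rs mask (some q)

-- the matched spans, pairing-only (no mask)
def matched : List (Int × Int) → Option (Int × Int) → List (Int × Int)
  | [], _ => []
  | r :: rs, none => matched rs (some r)
  | r :: rs, some q =>
    if r.2 - r.1 = q.2 - q.1 then (q.1, r.2) :: matched rs none
    else matched rs (some q)

-- A's loop computes exactly: pair up the runs of the suffix, starting from the given open state
theorem goA_eq_pairs (l : List Char) : ∀ (f : Nat) (i : Int), 0 ≤ i →
    ((l.length : Int) - i).toNat < f → ∀ mask,
    (goA l f mask none none i = pairs (collectTop l i) mask none) ∧
    (∀ s L, goA l f mask (some s) (some L) i = pairs (collectTop l i) mask (some (s, s + L))) := by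
  intro f
  induction f with
  | zero => intro i h0 hf; omega
  | succ f ih =>
    intro i h0 hf mask
    by_cases hi : i < (l.length : Int)
    · by_cases hc : l.getD i.toNat ' ' = '`'
      · have he := topA_gt l i hi hc
        have hm : ((l.length : Int) - runEndTopA l i).toNat < f := by omega
        rw [collectTop_run l i h0 hi hc]
        constructor
        · simp only [goA]
          rw [if_pos hi, if_neg (not_not_intro hc)]
          rw [(ih (runEndTopA l i) (by omega) hm mask).2 i (runEndTopA l i - i)]
          simp only [pairs]
          have : i + (runEndTopA l i - i) = runEndTopA l i := by omega
          rw [this]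
        · intro s L
          simp only [goA]
          rw [if_pos hi, if_neg (not_not_intro hc)]
          by_cases hL : runEndTopA l i - i = L
          · rw [if_pos (show runEndTopA l i - i = L ∧ (some s).isSome = true from ⟨hL, rfl⟩)]
            rw [(ih (runEndTopA l i) (by omega) hm
              (maskSet mask ((some s).getD 0) (runEndTopA l i))).1]
            simp only [pairs, Option.getD_some]
            rw [if_pos (by omega)]
          · rw [if_neg (by simp [hL])]
            rw [(ih (runEndTopA l i) (by omega) hm mask).2 s L]
            simp only [pairs]
            rw [if_neg (by omega)]
      · have hm : ((l.length : Int) - (i + 1)).toNat < f := by omega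
        rw [collectTop_skip l i h0 hi hc]
        refine ⟨?_, fun s L => ?_⟩
        · simp only [goA]
          rw [if_pos hi, if_pos hc]
          exact (ih (i + 1) (by omega) hm mask).1
        · simp only [goA]
          rw [if_pos hi, if_pos hc]
          exact (ih (i + 1) (by omega) hm mask).2 s L
    · rw [collectTop_stop l i hi]
      constructor
      · simp only [goA]; rw [if_neg hi]; rfl
      · intro s L; simp only [goA]; rw [if_neg hi]; rfl

-- pairs = fold of maskSet over the matched spans
theorem pairs_eq_matched (rs : List (Int × Int)) : ∀ mask o,
    pairs rs mask o = (matched rs o).foldl (fun m p => maskSet m p.1 p.2) mask := by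
  induction rs with
  | nil => intro mask o; cases o <;> rfl
  | cons r t ih =>
    intro mask o
    cases o with
    | none => simp only [pairs, matched]; exact ih mask (some r)
    | some q =>
      by_cases h : r.2 - r.1 = q.2 - q.1
      · simp only [pairs, matched, if_pos h, List.foldl_cons]
        exact ih (maskSet mask q.1 r.2) none
      · simp only [pairs, matched, if_neg h]
        exact ih mask (some q)

-- fuel facts for B's run_at
theorem runAtB_fuel (l : List Char) : ∀ (f f' : Nat) (i : Int), 0 ≤ i →
    ((l.length : Int) - i).toNat < f → ((l.length : Int) - i).toNat < f' →
    runAtB l f i = runAtB l f' i := by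
  intro f
  induction f with
  | zero => intro f' i h0 h; omega
  | succ f ih =>
    intro f' i h0 h h'
    cases f' with
    | zero => omega
    | succ f' =>
      simp only [runAtB]
      split
      · rename_i hi
        split
        · rename_i hc; exact ih f' (i + 1) (by omega) (by omega) (by omega)
        · rfl
      · rfl

theorem runAtTop_stop (l : List Char) (i : Int) (hi : ¬ i < (l.length : Int)) :
    runAtTop l i = none := by
  simp only [runAtTop, runAtB]
  rw [if_neg hi]

theorem runAtTop_skip (l : List Char) (i : Int) (h0 : 0 ≤ i) (hi : i < (l.length : Int))
    (hc : l.getD i.toNat ' ' ≠ '`') : runAtTop l i = runAtTop l (i + 1) := by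
  simp only [runAtTop, runAtB]
  rw [if_pos hi, if_pos hc]
  exact runAtB_fuel l l.length (l.length + 1) (i + 1) (by omega) (by omega) (by omega)

theorem runAtTop_run (l : List Char) (i : Int) (hi : i < (l.length : Int))
    (hc : l.getD i.toNat ' ' = '`') : runAtTop l i = some (i, runEndTopB l i) := by
  simp only [runAtTop, runAtB]
  rw [if_pos hi, if_neg (not_not_intro hc)]

theorem runAtB_some (l : List Char) : ∀ (f : Nat) (i s e : Int),
    runAtB l f i = some (s, e) → i ≤ s ∧ s < e ∧ e ≤ (l.length : Int) := by
  intro f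
  induction f with
  | zero => intro i s e h; simp [runAtB] at h
  | succ f ih =>
    intro i s e h
    simp only [runAtB] at h
    split at h
    · rename_i hi
      split at h
      · have := ih (i + 1) s e h; omega
      · rename_i hc
        push Not at hc
        simp only [Option.some.injEq, Prod.mk.injEq] at h
        obtain ⟨h5, h6⟩ := h
        subst h5; subst h6
        rw [topB_eq_topA]
        exact ⟨le_refl _, topA_gt l i hi hc, topA_le l i (by omega)⟩
    · simp at h

theorem runAtTop_some (l : List Char) (i s e : Int) (h : runAtTop l i = some (s, e)) :
    i ≤ s ∧ s < e ∧ e ≤ (l.length : Int) := runAtB_some l _ i s e h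

-- B's run_at finds exactly the head of the run list
theorem runAt_collectTop (l : List Char) : ∀ (f : Nat) (i : Int), 0 ≤ i →
    ((l.length : Int) - i).toNat < f →
    collectTop l i = (match runAtTop l i with
      | none => []
      | some se => se :: collectTop l se.2) := by
  intro f
  induction f with
  | zero => intro i h0 hf; omega
  | succ f ih =>
    intro i h0 hf
    by_cases hi : i < (l.length : Int)
    · by_cases hc : l.getD i.toNat ' ' = '`'
      · rw [collectTop_run l i h0 hi hc, runAtTop_run l i hi hc, topB_eq_topA]
      · rw [collectTop_skip l i h0 hi hc, runAtTop_skip l i h0 hi hc]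
        exact ih (i + 1) (by omega) (by omega)
    · rw [collectTop_stop l i hi, runAtTop_stop l i hi]

theorem collectTop_runAt_none (l : List Char) (i : Int) (h0 : 0 ≤ i)
    (hr : runAtTop l i = none) : collectTop l i = [] := by
  rw [runAt_collectTop l (l.length + 1) i h0 (by omega), hr]

theorem collectTop_runAt_some (l : List Char) (i : Int) (se : Int × Int) (h0 : 0 ≤ i)
    (hr : runAtTop l i = some se) : collectTop l i = se :: collectTop l se.2 := by
  rw [runAt_collectTop l (l.length + 1) i h0 (by omega), hr]

theorem huntB_none (l : List Char) (L : Int) : ∀ f : Nat, huntB l L f none = none := by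
  intro f; cases f <;> rfl

-- bounds on huntB's result
theorem huntB_some_le (l : List Char) (L : Int) : ∀ (f : Nat) (c : Option (Int × Int))
    (q : Int × Int), huntB l L f c = some q →
    (∀ r : Int × Int, c = some r → r.2 ≤ (l.length : Int)) → q.2 ≤ (l.length : Int) := by
  intro f
  induction f with
  | zero => intro c q h _; simp [huntB] at h
  | succ f ih =>
    intro c q h hin
    cases c with
    | none => simp [huntB] at h
    | some q0 =>
      simp only [huntB] at h
      split at h
      · refine ih (runAtTop l q0.2) q h ?_
        intro r hr
        exact (runAtTop_some l q0.2 r.1 r.2 (by rw [hr])).2.2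
      · injection h with h; subst h
        exact hin q0 rfl

theorem huntB_some_ge (l : List Char) (L : Int) : ∀ (f : Nat) (c : Option (Int × Int))
    (q : Int × Int), huntB l L f c = some q →
    ∀ r : Int × Int, c = some r → r.2 ≤ q.2 := by
  intro f
  induction f with
  | zero => intro c q h; simp [huntB] at h
  | succ f ih =>
    intro c q h r hr
    cases c with
    | none => simp [huntB] at h
    | some q0 =>
      injection hr with hr
      simp only [huntB] at h
      split at h
      · cases hq : runAtTop l q0.2 with
        | none => rw [hq, huntB_none] at h; exact absurd h (by simp)
        | some r' =>
          have hb := runAtTop_some l q0.2 r'.1 r'.2 (by rw [hq])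
          have := ih (runAtTop l q0.2) q h r' (by rw [hq])
          subst hr; omega
      · injection h with h; subst h; subst hr; exact le_refl _

-- hunting = skipping mismatched runs while an opener is held
theorem hunt_matched (l : List Char) : ∀ (f : Nat) (j : Int), 0 ≤ j →
    ((l.length : Int) - j).toNat < f → ∀ (q : Int × Int),
    (huntB l (q.2 - q.1) f (runAtTop l j) = none → matched (collectTop l j) (some q) = []) ∧
    (∀ c, huntB l (q.2 - q.1) f (runAtTop l j) = some c →
      matched (collectTop l j) (some q) = (q.1, c.2) :: matched (collectTop l c.2) none) := by
  intro f
  induction f with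
  | zero => intro j h0 hf; omega
  | succ f ih =>
    intro j h0 hf q
    cases hr : runAtTop l j with
    | none =>
      rw [collectTop_runAt_none l j h0 hr]
      exact ⟨fun _ => rfl, fun c hc => by simp [huntB] at hc⟩
    | some se =>
      rw [collectTop_runAt_some l j se h0 hr]
      have hb := runAtTop_some l j se.1 se.2 (by rw [hr])
      by_cases hL : se.2 - se.1 = q.2 - q.1
      · have hh : huntB l (q.2 - q.1) (f + 1) (some se) = some se := by
          simp only [huntB]
          rw [if_neg (not_not_intro hL)]
        constructor
        · intro h; rw [hh] at h; simp at h
        · intro c hc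
          rw [hh] at hc; injection hc with hc; subst hc
          simp only [matched, if_pos hL]
      · have hh : huntB l (q.2 - q.1) (f + 1) (some se) =
            huntB l (q.2 - q.1) f (runAtTop l se.2) := by
          simp only [huntB]
          rw [if_pos hL]
        have ihse := ih se.2 (by omega) (by omega) q
        constructor
        · intro h; rw [hh] at h
          simp only [matched, if_neg hL]
          exact ihse.1 h
        · intro c hc; rw [hh] at hc
          simp only [matched, if_neg hL]
          exact ihse.2 c hc

-- B's spans are exactly the matched spans of the run list
theorem spansB_eq_matched (l : List Char) : ∀ (f : Nat) (i : Int), 0 ≤ i →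
    ((l.length : Int) - i).toNat < f →
    spansB l f i = matched (collectTop l i) none := by
  intro f
  induction f with
  | zero => intro i h0 hf; omega
  | succ f ih =>
    intro i h0 hf
    simp only [spansB]
    cases hr : runAtTop l i with
    | none => rw [collectTop_runAt_none l i h0 hr]; rfl
    | some se =>
      rw [collectTop_runAt_some l i se h0 hr]
      have hb := runAtTop_some l i se.1 se.2 (by rw [hr])
      simp only [matched]
      cases hc : huntB l (se.2 - se.1) (l.length + 1) (runAtTop l se.2) with
      | none =>
        exact ((hunt_matched l (l.length + 1) se.2 (by omega) (by omega) se).1 hc).symm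
      | some c =>
        rw [(hunt_matched l (l.length + 1) se.2 (by omega) (by omega) se).2 c hc]
        have hge : se.2 ≤ c.2 := by
          cases hq : runAtTop l se.2 with
          | none => rw [hq] at hc; simp [huntB] at hc
          | some r =>
            have hrb := runAtTop_some l se.2 r.1 r.2 (by rw [hq])
            rw [hq] at hc
            have := huntB_some_ge l (se.2 - se.1) (l.length + 1) (some r) c hc r rfl
            omega
        have hle : c.2 ≤ (l.length : Int) := by
          cases hq : runAtTop l se.2 with
          | none => rw [hq] at hc; simp [huntB] at hc
          | some r =>
            have hrb := runAtTop_some l se.2 r.1 r.2 (by rw [hq])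
            rw [hq] at hc
            exact huntB_some_le l (se.2 - se.1) (l.length + 1) (some r) c hc
              (by intro r' hr'; injection hr' with hr'; subst hr'; omega)
        exact congrArg _ (ih c.2 (by omega) (by omega))

-- ordering invariants
def ChainR (n pos : Int) : List (Int × Int) → Prop
  | [] => True
  | r :: t => pos ≤ r.1 ∧ r.1 < r.2 ∧ r.2 ≤ n ∧ ChainR n r.2 t

def Chain (n pos : Int) : List (Int × Int) → Prop
  | [] => True
  | p :: t => pos ≤ p.1 ∧ p.1 ≤ p.2 ∧ p.2 ≤ n ∧ Chain n p.2 t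

theorem chainR_mono (n : Int) (rs : List (Int × Int)) :
    ∀ pos pos', pos' ≤ pos → ChainR n pos rs → ChainR n pos' rs := by
  cases rs with
  | nil => intro _ _ _ _; trivial
  | cons r t =>
    intro pos pos' h hc
    exact ⟨by have := hc.1; omega, hc.2⟩

theorem chain_mono (n : Int) (rs : List (Int × Int)) :
    ∀ pos pos', pos' ≤ pos → Chain n pos rs → Chain n pos' rs := by
  cases rs with
  | nil => intro _ _ _ _; trivial
  | cons r t =>
    intro pos pos' h hc
    exact ⟨by have := hc.1; omega, hc.2⟩

theorem collect_chain (l : List Char) : ∀ (f : Nat) (i : Int), 0 ≤ i →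
    ((l.length : Int) - i).toNat < f → ChainR (l.length : Int) i (collectTop l i) := by
  intro f
  induction f with
  | zero => intro i h0 hf; omega
  | succ f ih =>
    intro i h0 hf
    by_cases hi : i < (l.length : Int)
    · by_cases hc : l.getD i.toNat ' ' = '`'
      · rw [collectTop_run l i h0 hi hc]
        have hgt := topA_gt l i hi hc
        exact ⟨le_refl _, by omega, topA_le l i (by omega), ih (runEndTopA l i) (by omega)
          (by omega)⟩
      · rw [collectTop_skip l i h0 hi hc]
        exact chainR_mono _ _ (i + 1) i (by omega) (ih (i + 1) (by omega) (by omega))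
    · rw [collectTop_stop l i hi]; trivial

theorem matched_chain (n : Int) (rs : List (Int × Int)) :
    ∀ pos, ChainR n pos rs →
    (0 ≤ pos → Chain n pos (matched rs none)) ∧
    (∀ q : Int × Int, 0 ≤ q.1 → q.1 ≤ pos → Chain n q.1 (matched rs (some q))) := by
  induction rs with
  | nil => intro pos _; exact ⟨fun _ => trivial, fun _ _ _ => trivial⟩
  | cons r t ih =>
    intro pos hc
    obtain ⟨h1, h2, h3, h4⟩ := hc
    constructor
    · intro hpos
      simp only [matched]
      exact chain_mono n _ r.1 pos h1 ((ih r.2 h4).2 r (by omega) (by omega))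
    · intro q hq0 hqp
      simp only [matched]
      by_cases hL : r.2 - r.1 = q.2 - q.1
      · rw [if_pos hL]
        exact ⟨le_refl _, by omega, h3, (ih r.2 h4).1 (by omega)⟩
      · rw [if_neg hL]
        exact (ih r.2 h4).2 q hq0 (by omega)

-- characterisation of maskSet on an in-range interval
theorem maskSet_spec (m : List Bool) (a b : Int) (h0 : 0 ≤ a) (hab : a ≤ b)
    (hb : b ≤ (m.length : Int)) :
    maskSet m a b = m.take a.toNat ++ List.replicate (b - a).toNat true ++ m.drop b.toNat := by
  have key : ∀ (k : Nat) (a : Int) (m : List Bool), 0 ≤ a → a ≤ b → b ≤ (m.length : Int) →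
      (b - a).toNat = k →
      maskSet m a b = m.take a.toNat ++ List.replicate (b - a).toNat true ++ m.drop b.toNat := by
    intro k
    induction k with
    | zero =>
      intro a m h0 hab hb hk
      have hba : b = a := by omega
      subst hba
      rw [maskSet, PySem.List.pyRange_one_eq_nil (by omega)]
      simp
    | succ k ihk =>
      intro a m h0 hab hb hk
      have hlt : a < b := by omega
      rw [maskSet, PySem.List.pyRange_one_cons hlt]
      simp only [List.foldl_cons]
      rw [show (PySem.List.pyRange (a+1) b 1).foldl (fun m k => m.set k.toNat true)
            (m.set a.toNat true) = maskSet (m.set a.toNat true) (a+1) b from rfl]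
      rw [ihk (a+1) (m.set a.toNat true) (by omega) (by omega) (by simp; omega) (by omega)]
      have hal : a.toNat < m.length := by omega
      have h1 : (m.set a.toNat true).take (a+1).toNat = m.take a.toNat ++ [true] := by
        rw [List.take_set, show (a+1).toNat = a.toNat + 1 from by omega, List.take_add_one,
          List.getElem?_eq_getElem hal, List.set_append]
        rw [if_neg (by simp [Nat.min_eq_left (le_of_lt hal)])]
        simp [Nat.min_eq_left (le_of_lt hal)]
      have h2 : (m.set a.toNat true).drop b.toNat = m.drop b.toNat :=
        List.drop_set_of_lt (by omega)
      rw [h1, h2]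
      have h3 : List.replicate (b - a).toNat true =
          true :: List.replicate (b - (a+1)).toNat true := by
        rw [show (b - a).toNat = (b - (a+1)).toNat + 1 from by omega, List.replicate_succ]
      rw [h3]
      simp
  exact key (b - a).toNat a m h0 hab hb rfl

-- segment assembly = fold of maskSet, on a chained span list
theorem build_eq (n : Int) (sp : List (Int × Int)) :
    ∀ (P : List Bool) (pos : Int), Chain n pos sp → P.length = pos.toNat → 0 ≤ pos →
    pos ≤ n →
    sp.foldl (fun m p => maskSet m p.1 p.2) (P ++ List.replicate (n - pos).toNat false) =
      (sp.foldl bStep2 (P, pos)).1 ++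
        List.replicate (n - (sp.foldl bStep2 (P, pos)).2).toNat false := by
  induction sp with
  | nil => intro P pos _ _ _ _; rfl
  | cons p t ih =>
    intro P pos hc hP h0 hn
    obtain ⟨h1, h2, h3, h4⟩ := hc
    simp only [List.foldl_cons]
    have hlen : ((P ++ List.replicate (n - pos).toNat false).length : Int) = n := by
      simp [hP]; omega
    rw [maskSet_spec _ p.1 p.2 (by omega) h2 (by omega)]
    have htake : (P ++ List.replicate (n - pos).toNat false).take p.1.toNat =
        P ++ List.replicate (p.1 - pos).toNat false := by
      rw [List.take_append]
      congr 1
      · rw [List.take_of_length_le (by omega)]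
      · rw [List.take_replicate]
        congr 1; omega
    have hdrop : (P ++ List.replicate (n - pos).toNat false).drop p.2.toNat =
        List.replicate (n - p.2).toNat false := by
      rw [List.drop_append]
      rw [List.drop_of_length_le (by omega), List.nil_append, List.drop_replicate]
      congr 1; omega
    rw [htake, hdrop]
    have hstep : bStep2 (P, pos) p =
        (P ++ List.replicate (p.1 - pos).toNat false ++ List.replicate (p.2 - p.1).toNat true,
          p.2) := rfl
    rw [hstep]
    have := ih (P ++ List.replicate (p.1 - pos).toNat false ++
        List.replicate (p.2 - p.1).toNat true) p.2 h4
      (by simp [hP]; omega) (by omega) h3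
    rw [← this]

-- ===== VERDICT (by name: the statement is the Claim_ definition above) =====
theorem inline_code_mask_py_spec : Claim_equal_inline_code_mask_py := by
  intro line _
  show inline_code_mask_py line = inline_code_mask_py_alt line
  have ha : inline_code_mask_py line =
      goA line.toList (line.toList.length + 1) (List.replicate line.toList.length false)
        none none 0 := rfl
  have hb : inline_code_mask_py_alt line =
      ((spansB line.toList (line.toList.length + 1) 0).foldl bStep2 ([], 0)).1 ++
        List.replicate ((line.toList.length : Int) -
          ((spansB line.toList (line.toList.length + 1) 0).foldl bStep2 ([], 0)).2).toNat
          false := rfl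
  rw [ha, hb]
  set l := line.toList with hl
  rw [(goA_eq_pairs l (l.length + 1) 0 (by omega) (by omega)
    (List.replicate l.length false)).1]
  rw [pairs_eq_matched, spansB_eq_matched l (l.length + 1) 0 (by omega) (by omega)]
  have hch : Chain (l.length : Int) 0 (matched (collectTop l 0) none) :=
    (matched_chain (l.length : Int) (collectTop l 0) 0
      (collect_chain l (l.length + 1) 0 (by omega) (by omega))).1 (by omega)
  have := build_eq (l.length : Int) (matched (collectTop l 0) none) [] 0 hch (by simp)
    (by omega) (by omega)
  simpa using this
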